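-- pv_equiv track=rewrite | github.com/FIREpresent/EGE | 16092024/№9.py | check
-- ===== SOURCE A (Python) =====
-- def check(arr):
--     arr2 = [x for x in arr]
--     v = []
--     summ = 0
--     for i in range(len(arr2)):
--         same = 0
--         for j in range(len(arr2)):
--             if arr2[i] == arr2[j]:
--                 same += 1
--         v.append(same)
--     for i in range(len(v)):
--         if v[i] == 2:
--             summ += (v[i]-1)*arr2[i]
--         elif v[i] == 3:
--             summ += (v[i]-2)*arr2[i]
--     if summ < max(arr2):
--         v.clear()
--         return 1
--
--     v.clear()
--     return 0
-- ===== SOURCE B (Python) =====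
-- def check(arr):
--     counts = {}
--     for x in arr:
--         counts[x] = counts.get(x, 0) + 1
--     summ = 0
--     for value, c in counts.items():
--         if c == 2 or c == 3:
--             summ += c * value
--     return 1 if summ < max(arr) else 0
-- ===== Notes on version B (the rewrite author's own statement) =====
-- stated objective: faster
-- what changed: Replaced the O(n^2) nested occurrence-counting loops by a single dictionary-counting pass whose distinct (value, count) items are summed once.
import Mathlib
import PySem

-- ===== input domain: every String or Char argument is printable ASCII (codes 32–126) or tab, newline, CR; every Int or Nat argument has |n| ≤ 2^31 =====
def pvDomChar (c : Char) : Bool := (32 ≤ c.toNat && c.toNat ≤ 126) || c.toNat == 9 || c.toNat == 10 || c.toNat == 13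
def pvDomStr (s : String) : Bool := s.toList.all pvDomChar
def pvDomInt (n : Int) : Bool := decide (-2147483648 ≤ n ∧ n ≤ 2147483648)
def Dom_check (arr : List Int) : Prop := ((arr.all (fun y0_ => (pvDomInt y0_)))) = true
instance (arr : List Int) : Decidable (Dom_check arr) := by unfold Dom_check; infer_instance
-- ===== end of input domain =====

-- B replaces A's quadratic nested counting loops by one dictionary-counting pass (faster, O(n) vs O(n^2)).

-- ===== PORT A =====
def check (arr : List Int) : Int :=
  let arr2 := arr.map (fun x => x)
  let v := (PySem.List.pyRange 0 (arr2.length : Int) 1).foldl (fun v i =>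
      let same := (PySem.List.pyRange 0 (arr2.length : Int) 1).foldl (fun same j =>
          if PySem.List.pyGetD arr2 i 0 == PySem.List.pyGetD arr2 j 0 then same + 1 else same)
        (0 : Int)
      v ++ [same]) ([] : List Int)
  let summ := (PySem.List.pyRange 0 (v.length : Int) 1).foldl (fun summ i =>
      let vi := PySem.List.pyGetD v i 0
      if vi == 2 then summ + (vi - 1) * PySem.List.pyGetD arr2 i 0
      else if vi == 3 then summ + (vi - 2) * PySem.List.pyGetD arr2 i 0
      else summ) (0 : Int)
  match PySem.List.max? arr2 (fun x => x) with
  | some m => if summ < m then 1 else 0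
  | none => 0   -- unreachable under Pre_check (Python raises ValueError on [])

-- ===== PORT B =====
def check_alt (arr : List Int) : Int :=
  let counts := arr.foldl (fun d x => d.insert x (d.getD x 0 + 1)) (PySem.Dict.empty : PySem.Dict Int Int)
  let summ := counts.items.foldl (fun s p =>
      if p.2 == 2 || p.2 == 3 then s + p.2 * p.1 else s) (0 : Int)
  match PySem.List.max? arr (fun x => x) with
  | some m => if summ < m then 1 else 0
  | none => 0   -- unreachable under Pre_check (max() raises on [])

-- ===== PRECONDITION & SPEC =====
-- Pre_ excludes only the empty list, on which A raises ValueError at max().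
def Pre_check (arr : List Int) : Prop := arr ≠ []
instance (arr : List Int) : Decidable (Pre_check arr) := by unfold Pre_check; infer_instance
def pvWitness_check : List Int := ([1, 2, 2, 3])

def Spec_check (arr : List Int) (out : Int) : Prop := out = check_alt arr
instance (arr : List Int) (out : Int) : Decidable (Spec_check arr out) := by unfold Spec_check; infer_instance

-- ===== CLAIM (what is proved, stated in full; the proofs are below) =====
def Claim_equal_check : Prop := ∀ (arr : List Int), Dom_check arr → Pre_check arr → Spec_check arr (check arr)

-- ===== LEMMAS AND PROOFS =====

-- the per-occurrence contribution of a value x in arr, as A computes it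
def contrib (arr : List Int) (x : Int) : Int :=
  if (arr.count x : Int) == 2 then x else if (arr.count x : Int) == 3 then x else 0

-- sum of an indicator over a Nodup list
lemma sum_map_ite_eq {x : Int} {a : Int} (S : List Int) (hnd : S.Nodup) :
    (S.map (fun k => if k = x then a else 0)).sum = if x ∈ S then a else 0 := by
  induction S with
  | nil => simp
  | cons y t ih =>
    simp only [List.nodup_cons] at hnd
    simp only [List.map_cons, List.sum_cons, ih hnd.2, List.mem_cons]
    by_cases hyx : y = x
    · subst hyx
      simp [hnd.1]
    · simp [hyx, Ne.symm hyx]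

-- Σ_{x ∈ l} f x = Σ_{k ∈ set(l)} count(k) * f k, for a fixed f
lemma sum_map_eq_sum_set (f : Int → Int) (l : List Int) :
    (l.map f).sum = ((PySem.Set.ofList l).map (fun k => (l.count k : Int) * f k)).sum := by
  induction l using List.reverseRecOn with
  | nil => simp [PySem.Set.ofList]
  | append_singleton t x ih =>
    have hset : PySem.Set.ofList (t ++ [x]) = PySem.Set.add (PySem.Set.ofList t) x := by
      rw [PySem.Set.ofList_eq_foldl, PySem.Set.ofList_eq_foldl, List.foldl_append]
      rfl
    have hcnt1 : ∀ k : Int, ([x].count k : Int) = if k = x then 1 else 0 := by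
      intro k
      by_cases h : k = x
      · subst h; simp
      · have : k ∉ [x] := by simp [h]
        simp [List.count_eq_zero_of_not_mem this, h]
    have hcount : ∀ k, ((t ++ [x]).count k : Int) = (t.count k : Int) + (if k = x then 1 else 0) := by
      intro k
      rw [List.count_append]
      push_cast
      rw [hcnt1 k]
    by_cases hx : x ∈ t
    · have hmem : x ∈ PySem.Set.ofList t := (PySem.Set.mem_ofList t x).2 hx
      rw [hset, PySem.Set.add_of_mem hmem]
      have hsplit : ((PySem.Set.ofList t).map (fun k => ((t ++ [x]).count k : Int) * f k)).sum
          = ((PySem.Set.ofList t).map (fun k => (t.count k : Int) * f k)).sum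
            + ((PySem.Set.ofList t).map (fun k => if k = x then f x else 0)).sum := by
        rw [← PySem.List.sum_map_add_int]
        apply congrArg
        apply List.map_congr_left
        intro k _
        rw [hcount k]
        by_cases hk : k = x
        · subst hk; simp; ring
        · simp [hk]
      rw [hsplit, sum_map_ite_eq _ (PySem.Set.nodup_ofList t)]
      simp [hmem, ih]
    · have hmem : x ∉ PySem.Set.ofList t := fun h => hx ((PySem.Set.mem_ofList t x).1 h)
      rw [hset, PySem.Set.add_of_not_mem hmem]
      simp only [List.map_append, List.sum_append]
      have h1 : ((PySem.Set.ofList t).map (fun k => ((t ++ [x]).count k : Int) * f k)).sum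
          = ((PySem.Set.ofList t).map (fun k => (t.count k : Int) * f k)).sum := by
        apply congrArg
        apply List.map_congr_left
        intro k hk
        have hkx : k ≠ x := fun h => hmem (h ▸ hk)
        rw [hcount k]
        simp [hkx]
      have h2 : (t.count x : Int) = 0 := by
        simp [List.count_eq_zero_of_not_mem hx]
      rw [h1, ← ih]
      simp only [List.map_cons, List.map_nil, List.sum_cons, List.sum_nil, hcount x, h2]
      simp

-- A's summ equals the sum of per-occurrence contributions
lemma sumA_eq (arr : List Int) :
    (PySem.List.pyRange 0
      (((PySem.List.pyRange 0 (arr.length : Int) 1).foldl (fun v i =>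
          v ++ [(PySem.List.pyRange 0 (arr.length : Int) 1).foldl (fun same j =>
              if PySem.List.pyGetD arr i 0 == PySem.List.pyGetD arr j 0 then same + 1 else same)
            (0 : Int)]) ([] : List Int)).length : Int) 1).foldl (fun summ i =>
      let vi := PySem.List.pyGetD
        ((PySem.List.pyRange 0 (arr.length : Int) 1).foldl (fun v i =>
          v ++ [(PySem.List.pyRange 0 (arr.length : Int) 1).foldl (fun same j =>
              if PySem.List.pyGetD arr i 0 == PySem.List.pyGetD arr j 0 then same + 1 else same)
            (0 : Int)]) ([] : List Int)) i 0
      if vi == 2 then summ + (vi - 1) * PySem.List.pyGetD arr i 0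
      else if vi == 3 then summ + (vi - 2) * PySem.List.pyGetD arr i 0
      else summ) (0 : Int)
    = (arr.map (contrib arr)).sum := by
  -- the inner counting loop computes count of arr[i]
  have hsame : ∀ i : Int,
      (PySem.List.pyRange 0 (arr.length : Int) 1).foldl (fun same j =>
          if PySem.List.pyGetD arr i 0 == PySem.List.pyGetD arr j 0 then same + 1 else same)
        (0 : Int) = (arr.count (PySem.List.pyGetD arr i 0) : Int) := by
    intro i
    rw [PySem.List.foldl_pyRange_zero_pyGetD' arr 0
      (fun same y => if PySem.List.pyGetD arr i 0 == y then same + 1 else same) 0]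
    rw [PySem.List.foldl_if_add_one (p := fun y => PySem.List.pyGetD arr i 0 == y)]
    have hcp : arr.countP (fun y => PySem.List.pyGetD arr i 0 == y)
        = arr.count (PySem.List.pyGetD arr i 0) := by
      unfold List.count
      apply List.countP_congr
      intro y _
      by_cases h : PySem.List.pyGetD arr i 0 = y
      · rw [h]
      · simp [h, Ne.symm h]
    rw [hcp]
    ring
  -- v is a map over the range
  have hv : (PySem.List.pyRange 0 (arr.length : Int) 1).foldl (fun v i =>
        v ++ [(PySem.List.pyRange 0 (arr.length : Int) 1).foldl (fun same j =>
            if PySem.List.pyGetD arr i 0 == PySem.List.pyGetD arr j 0 then same + 1 else same)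
          (0 : Int)]) ([] : List Int)
      = (PySem.List.pyRange 0 (arr.length : Int) 1).map
          (fun i => (arr.count (PySem.List.pyGetD arr i 0) : Int)) := by
    rw [PySem.List.foldl_append_singleton_eq_map]
    simp only [List.nil_append]
    exact List.map_congr_left (fun i _ => hsame i)
  rw [hv]
  have hvlen : ((PySem.List.pyRange 0 (arr.length : Int) 1).map
      (fun i => (arr.count (PySem.List.pyGetD arr i 0) : Int))).length = arr.length := by
    simp [PySem.List.length_pyRange_one]
  rw [hvlen]
  -- rewrite v[i] inside the loop using membership in the range
  have hstep1 : (PySem.List.pyRange 0 (arr.length : Int) 1).foldl (fun summ i =>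
      let vi := PySem.List.pyGetD ((PySem.List.pyRange 0 (arr.length : Int) 1).map
          (fun i => (arr.count (PySem.List.pyGetD arr i 0) : Int))) i 0
      if vi == 2 then summ + (vi - 1) * PySem.List.pyGetD arr i 0
      else if vi == 3 then summ + (vi - 2) * PySem.List.pyGetD arr i 0
      else summ) (0 : Int)
    = (PySem.List.pyRange 0 (arr.length : Int) 1).foldl (fun summ i =>
      let vi := (arr.count (PySem.List.pyGetD arr i 0) : Int)
      if vi == 2 then summ + (vi - 1) * PySem.List.pyGetD arr i 0
      else if vi == 3 then summ + (vi - 2) * PySem.List.pyGetD arr i 0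
      else summ) (0 : Int) := by
    apply PySem.List.foldl_congr_mem
    intro acc i hi
    have hi' := PySem.List.mem_pyRange_one.mp hi
    have hget : PySem.List.pyGetD ((PySem.List.pyRange 0 (arr.length : Int) 1).map
        (fun i => (arr.count (PySem.List.pyGetD arr i 0) : Int))) i 0
        = (arr.count (PySem.List.pyGetD arr i 0) : Int) :=
      PySem.List.pyGetD_map_pyRange_of_nonneg _ _ _ _ hi'.1 hi'.2
    simp only [hget]
  rw [hstep1]
  -- the loop now reads only arr[i]
  rw [PySem.List.foldl_pyRange_zero_pyGetD' arr 0
    (fun summ x =>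
      if ((arr.count x : Int)) == 2 then summ + ((arr.count x : Int) - 1) * x
      else if ((arr.count x : Int)) == 3 then summ + ((arr.count x : Int) - 2) * x
      else summ) 0]
  -- turn the branchy body into 'acc + contrib' and sum
  have hstep2 : arr.foldl (fun summ x =>
      if ((arr.count x : Int)) == 2 then summ + ((arr.count x : Int) - 1) * x
      else if ((arr.count x : Int)) == 3 then summ + ((arr.count x : Int) - 2) * x
      else summ) (0 : Int)
    = arr.foldl (fun acc x => acc + contrib arr x) (0 : Int) := by
    apply PySem.List.foldl_congr_mem
    intro acc x _
    unfold contrib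
    split_ifs with h1 h2
    · have : (arr.count x : Int) = 2 := by exact_mod_cast beq_iff_eq.mp h1
      rw [this]; ring
    · have : (arr.count x : Int) = 3 := by exact_mod_cast beq_iff_eq.mp h2
      rw [this]; ring
    · ring
  rw [hstep2, PySem.List.foldl_add]
  simp

-- B's summ equals the same sum
lemma sumB_eq (arr : List Int) :
    ((arr.foldl (fun d x => d.insert x (d.getD x 0 + 1))
        (PySem.Dict.empty : PySem.Dict Int Int)).items).foldl (fun s p =>
      if p.2 == 2 || p.2 == 3 then s + p.2 * p.1 else s) (0 : Int)
    = (arr.map (contrib arr)).sum := by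
  rw [PySem.Dict.foldl_insert_getD_add_one_eq_counter, PySem.Dict.items_counter]
  have hstep : ((PySem.Set.ofList arr).map (fun k => (k, (arr.count k : Int)))).foldl (fun s p =>
        if p.2 == 2 || p.2 == 3 then s + p.2 * p.1 else s) (0 : Int)
      = ((PySem.Set.ofList arr).map (fun k => (k, (arr.count k : Int)))).foldl (fun s p =>
        s + (if p.2 == 2 || p.2 == 3 then p.2 * p.1 else 0)) (0 : Int) := by
    apply PySem.List.foldl_congr_mem
    intro acc p _
    split_ifs with h <;> simp
  rw [hstep, PySem.List.foldl_add]
  simp only [List.map_map]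
  rw [sum_map_eq_sum_set (contrib arr) arr]
  simp only [Int.zero_add]
  apply congrArg
  apply List.map_congr_left
  intro k _
  unfold contrib
  by_cases h2 : (arr.count k : Int) = 2
  · simp [h2]
  · by_cases h3 : (arr.count k : Int) = 3
    · simp [h3]
    · simp [h2, h3]

-- ===== VERDICT (by name: the statement is the Claim_ definition above) =====
theorem check_spec : Claim_equal_check := by
  intro arr _ hpre
  unfold Spec_check check check_alt
  simp only [List.map_id']
  rw [sumA_eq arr, sumB_eq arr]
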